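-- pv_equiv track=rewrite | github.com/anabdsantos/Projetos-FP | projeto1/FP2324P1.py | obtem_ultima_intersecao
-- ===== SOURCE A (Python) =====
-- def obtem_ultima_intersecao(t):
--    '''
--    obtem ultima intersecao: territorio -> intersecao
--    obtem ultima intersecao(t) recebe um territorio e devolve a intersecao do extremo superior direito do territorio.
--    '''
--    intersecao=()
--    for tuplo in range(len(t)):
--       if t[tuplo]==t[-1]: #Queremos obter o último tuplo
--        vertical=chr(65+tuplo)
--        for elemento in range(len(t[tuplo])):
--           if t[tuplo][elemento]==t[tuplo][-1]: #Queremos obter o último elemento do último tuplo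
--             horizontal=(elemento+1)
--        intersecao=(vertical,horizontal,)
--    return intersecao
-- ===== SOURCE B (Python) =====
-- def obtem_ultima_intersecao(t):
--     '''Closed form: the top-right intersection is the last row's letter and the last row's length.'''
--     return (chr(65 + len(t) - 1), len(t[-1]))
-- ===== Notes on version B (the rewrite author's own statement) =====
-- stated objective: simpler
-- what changed: Replaces the doubly-nested scan (which only ever keeps the values computed at the last row and last column) by the one-line closed form (chr(65+len(t)-1), len(t[-1])).
-- outside the precondition, e.g. on obtem_ultima_intersecao([]): A returns (), B raises IndexError
import Mathlib
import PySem

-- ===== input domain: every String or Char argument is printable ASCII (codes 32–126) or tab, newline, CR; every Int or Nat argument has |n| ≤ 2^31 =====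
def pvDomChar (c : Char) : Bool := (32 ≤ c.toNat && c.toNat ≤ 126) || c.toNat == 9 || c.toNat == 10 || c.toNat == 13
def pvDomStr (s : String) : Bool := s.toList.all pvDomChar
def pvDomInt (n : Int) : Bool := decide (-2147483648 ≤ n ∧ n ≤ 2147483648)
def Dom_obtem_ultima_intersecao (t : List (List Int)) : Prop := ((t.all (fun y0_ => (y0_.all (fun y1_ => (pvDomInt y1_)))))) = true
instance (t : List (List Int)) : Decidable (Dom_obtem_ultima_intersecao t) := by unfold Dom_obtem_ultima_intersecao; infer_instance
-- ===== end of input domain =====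

-- B replaces A's nested scan by the one-line closed form (chr(65+len(t)-1), len(t[-1])) (objective: simpler).
-- Equivalence is about return values on Pre_ (nonempty territory with nonempty last row).

-- ===== PORT A =====
-- State: (intersecao as Option (String × Int) — none models the initial (); horizontal as
-- Option Int — none models the yet-unbound Python local). Inputs where the result would be
-- () or where horizontal stays unbound (Python raises / leaves the type) are excluded by Pre_.
def obtem_ultima_intersecao (t : List (List Int)) : String × Int :=
  let st := (List.range t.length).foldl
    (fun (st : Option (String × Int) × Option Int) tuplo =>
      if t.getD tuplo [] == t.getLast! then
        let vertical := String.ofList [Char.ofNat (65 + tuplo)]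
        let row := t.getD tuplo []
        let horizontal := (List.range row.length).foldl
          (fun (h : Option Int) elemento =>
            if row.getD elemento 0 == row.getLast! then some ((elemento : Int) + 1) else h)
          st.2
        match horizontal with
        | some h => (some (vertical, h), some h)
        | none => st          -- Python would raise UnboundLocalError here; outside Pre_
      else st)
    (none, none)
  st.1.getD ("", 0)           -- Python would return () here; outside Pre_

-- ===== PORT B =====
def obtem_ultima_intersecao_alt (t : List (List Int)) : String × Int :=
  (String.ofList [Char.ofNat (65 + t.length - 1)], (t.getLast!.length : Int))

-- ===== PRECONDITION & SPEC =====
-- Pre_ excludes the empty territory (A returns the empty tuple (), not a String × Int) and a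
-- nonempty territory whose last row is empty (A raises UnboundLocalError).
def Pre_obtem_ultima_intersecao (t : List (List Int)) : Prop := t ≠ [] ∧ t.getLast! ≠ []
instance (t : List (List Int)) : Decidable (Pre_obtem_ultima_intersecao t) := by
  unfold Pre_obtem_ultima_intersecao; infer_instance
def pvWitness_obtem_ultima_intersecao : List (List Int) := [[1, 2], [3, 4]]

def Spec_obtem_ultima_intersecao (t : List (List Int)) (out : String × Int) : Prop :=
  out = obtem_ultima_intersecao_alt t
instance (t : List (List Int)) (out : String × Int) : Decidable (Spec_obtem_ultima_intersecao t out) := by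
  unfold Spec_obtem_ultima_intersecao; infer_instance

-- ===== CLAIM (what is proved, stated in full; the proofs are below) =====
def Claim_equal_obtem_ultima_intersecao : Prop := ∀ (t : List (List Int)), Dom_obtem_ultima_intersecao t → Pre_obtem_ultima_intersecao t → Spec_obtem_ultima_intersecao t (obtem_ultima_intersecao t)

-- ===== LEMMAS AND PROOFS =====

-- The last element via getD equals getLast!.
theorem pv_getD_last {α : Type} [Inhabited α] (l : List α) (d : α) (h : l ≠ []) :
    l.getD (l.length - 1) d = l.getLast! := by
  have hlen : l.length - 1 < l.length := by
    cases l with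
    | nil => exact absurd rfl h
    | cons a l => simp
  have h2 : l.getLast! = l.getLast h := by
    cases l with
    | nil => exact absurd rfl h
    | cons a as => simp [List.getLast!]
  rw [List.getD_eq_getElem l d hlen, h2, List.getLast_eq_getElem]

-- The inner loop always ends with some (row.length) when the row is nonempty,
-- because the last index always matches and overwrites the state.
theorem pv_inner (row : List Int) (h : row ≠ []) (init : Option Int) :
    (List.range row.length).foldl
      (fun (hz : Option Int) elemento =>
        if row.getD elemento 0 == row.getLast! then some ((elemento : Int) + 1) else hz)
      init = some (row.length : Int) := by
  obtain ⟨m, hm⟩ : ∃ m, row.length = m + 1 := by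
    cases row with
    | nil => exact absurd rfl h
    | cons a l => exact ⟨l.length, by simp⟩
  rw [hm, List.range_succ, List.foldl_append]
  have hcond : (row.getD m 0 == row.getLast!) = true := by
    rw [show m = row.length - 1 by omega, pv_getD_last row 0 h]
    simp
  simp only [List.foldl_cons, List.foldl_nil, hcond, if_pos]
  simp

-- The outer loop's last iteration always matches (t[-1] == t[-1]) and overwrites the state
-- with the closed-form answer.
theorem pv_main (t : List (List Int)) (ht : t ≠ []) (hl : t.getLast! ≠ []) :
    obtem_ultima_intersecao t = obtem_ultima_intersecao_alt t := by
  obtain ⟨n, hn⟩ : ∃ n, t.length = n + 1 := by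
    cases t with
    | nil => exact absurd rfl ht
    | cons a l => exact ⟨l.length, by simp⟩
  unfold obtem_ultima_intersecao obtem_ultima_intersecao_alt
  rw [hn, List.range_succ, List.foldl_append]
  have hrow : t.getD n [] = t.getLast! := by
    rw [show n = t.length - 1 by omega]
    exact pv_getD_last t [] ht
  have hcond : (t.getD n [] == t.getLast!) = true := by rw [hrow]; simp
  simp only [List.foldl_cons, List.foldl_nil, hcond, if_pos]
  rw [hrow, pv_inner _ hl]
  simp

-- ===== VERDICT (by name: the statement is the Claim_ definition above) =====
theorem obtem_ultima_intersecao_spec : Claim_equal_obtem_ultima_intersecao := by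
  intro t _ hpre
  unfold Spec_obtem_ultima_intersecao
  exact pv_main t hpre.1 hpre.2
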